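-- pv_equiv track=rewrite | github.com/Michieldoesburg/economics_of_cybersecurity | Assignment-Block-4/code/top_20_percent_succesful_vendors_.py | get_vendors_per_item
-- ===== SOURCE A (Python) =====
-- def get_vendors_per_item(items, vendors):
-- 	vendor_per_item = dict()
-- 	for item_index in range(len(items)):
-- 		if items[item_index] in vendor_per_item and vendors[item_index] not in vendor_per_item[items[item_index]]:
-- 			vendor_per_item[items[item_index]].append(vendors[item_index])
-- 		elif items[item_index] not in vendor_per_item:
-- 			vendor_per_item[items[item_index]] = [vendors[item_index]]
-- 	return vendor_per_item
-- ===== SOURCE B (Python) =====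
-- def get_vendors_per_item(items, vendors):
--     groups = dict()
--     for i in range(len(items)):
--         groups.setdefault(items[i], []).append(vendors[i])
--     return {item: list(dict.fromkeys(vs)) for item, vs in groups.items()}
-- ===== Notes on version B (the rewrite author's own statement) =====
-- stated objective: simpler
-- what changed: A's branch-heavy single pass (conditional append vs fresh-key insert per index) is replaced by two plain passes: group every vendor per item with setdefault, then deduplicate each list with dict.fromkeys preserving first-occurrence order.
-- outside the precondition, e.g. on get_vendors_per_item(['a', 'b'], ['x']): A raises IndexError, B raises IndexError
import Mathlib
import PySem

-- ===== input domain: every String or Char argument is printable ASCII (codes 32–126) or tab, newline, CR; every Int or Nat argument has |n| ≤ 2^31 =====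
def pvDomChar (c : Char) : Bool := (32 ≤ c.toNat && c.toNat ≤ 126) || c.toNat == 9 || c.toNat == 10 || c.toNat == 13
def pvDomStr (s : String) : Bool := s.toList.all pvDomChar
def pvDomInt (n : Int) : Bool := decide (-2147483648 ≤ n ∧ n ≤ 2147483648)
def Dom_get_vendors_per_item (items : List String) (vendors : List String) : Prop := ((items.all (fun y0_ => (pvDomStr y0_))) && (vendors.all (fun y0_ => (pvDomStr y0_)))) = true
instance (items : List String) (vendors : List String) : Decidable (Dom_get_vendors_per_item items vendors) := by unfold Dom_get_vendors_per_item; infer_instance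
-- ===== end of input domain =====

-- B replaces A's branch-heavy single pass by two plain passes (group everything, then dedup each
-- list with dict.fromkeys): objective 'simpler', same asymptotic cost, same return value.

-- ===== PORT A =====
-- A: one pass over indices, conditional append / fresh-key insert into the dict.
def get_vendors_per_item (items : List String) (vendors : List String) : List (String × List String) :=
  ((PySem.List.pyRange 0 (items.length : Int) 1).foldl
    (fun d i =>
      let it := PySem.List.pyGetD items i ""
      let v := PySem.List.pyGetD vendors i ""
      if d.contains it && !((d.getD it []).contains v) then
        d.modify it [] (· ++ [v])
      else if !(d.contains it) then
        d.insert it [v]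
      else d)
    (PySem.Dict.empty : PySem.Dict String (List String))).items

-- ===== PORT B =====
-- B: pass 1 groups every vendor per item (setdefault+append = modify with default []),
-- pass 2 rebuilds the dict with each list deduplicated via dict.fromkeys (= PySem.List.dedup).
def get_vendors_per_item_alt (items : List String) (vendors : List String) : List (String × List String) :=
  let groups := (PySem.List.pyRange 0 (items.length : Int) 1).foldl
    (fun d i => d.modify (PySem.List.pyGetD items i "") [] (· ++ [PySem.List.pyGetD vendors i ""]))
    (PySem.Dict.empty : PySem.Dict String (List String))
  groups.items.map (fun p => (p.1, PySem.List.dedup p.2))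

-- ===== PRECONDITION & SPEC =====
-- Pre_ excludes items longer than vendors, where both A and B raise IndexError on vendors[i].
def Pre_get_vendors_per_item (items : List String) (vendors : List String) : Prop :=
  items.length ≤ vendors.length
instance (items : List String) (vendors : List String) : Decidable (Pre_get_vendors_per_item items vendors) := by unfold Pre_get_vendors_per_item; infer_instance
def pvWitness_get_vendors_per_item : List String × List String := (["a", "b", "a"], ["x", "y", "x"])

def Spec_get_vendors_per_item (items : List String) (vendors : List String) (out : List (String × List String)) : Prop := out = get_vendors_per_item_alt items vendors
instance (items : List String) (vendors : List String) (out : List (String × List String)) : Decidable (Spec_get_vendors_per_item items vendors out) := by unfold Spec_get_vendors_per_item; infer_instance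

-- ===== CLAIM (what is proved, stated in full; the proofs are below) =====
def Claim_equal_get_vendors_per_item : Prop := ∀ (items : List String) (vendors : List String), Dom_get_vendors_per_item items vendors → Pre_get_vendors_per_item items vendors → Spec_get_vendors_per_item items vendors (get_vendors_per_item items vendors)

-- ===== LEMMAS AND PROOFS =====

-- f maps a grouped entry to its deduplicated form (the invariant tying A's dict to B's).
def pvDedupEntry (p : String × List String) : String × List String := (p.1, PySem.List.dedup p.2)

theorem pv_dedup_append (xs : List String) (v : String) :
    PySem.Set.ofList (xs ++ [v])
      = if v ∈ xs then PySem.Set.ofList xs else PySem.Set.ofList xs ++ [v] := by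
  have hc : (PySem.Set.ofList xs).contains v = true ↔ v ∈ xs := by
    simp [PySem.Set.contains, PySem.Set.mem_ofList]
  simp only [PySem.Set.ofList_append, PySem.Set.update, List.foldl_cons, List.foldl_nil,
    PySem.Set.add]
  by_cases h : v ∈ xs
  · rw [if_pos (hc.mpr h), if_pos h]
  · rw [if_neg (fun hh => h (hc.mp hh)), if_neg h]

theorem pv_find?_map (l : List (String × List String)) (k : String) :
    (l.map pvDedupEntry).find? (fun p => p.1 == k) = (l.find? (fun p => p.1 == k)).map pvDedupEntry := by
  induction l with
  | nil => rfl
  | cons p rest ih =>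
      simp only [List.map_cons]
      by_cases h : p.1 = k
      · rw [List.find?_cons_of_pos (by simp [pvDedupEntry, h]),
           List.find?_cons_of_pos (by simp [h])]
        rfl
      · rw [List.find?_cons_of_neg (by simp [pvDedupEntry, h]),
           List.find?_cons_of_neg (by simp [h])]
        exact ih

theorem pv_get?_map (dB : PySem.Dict String (List String)) (k : String) :
    (PySem.Dict.mk (dB.items.map pvDedupEntry)).get? k = (dB.get? k).map PySem.List.dedup := by
  simp only [PySem.Dict.get?]
  rw [pv_find?_map]
  cases dB.items.find? (fun p => p.1 == k) <;> simp [pvDedupEntry]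

theorem pv_contains_map (dB : PySem.Dict String (List String)) (k : String) :
    (PySem.Dict.mk (dB.items.map pvDedupEntry)).contains k = dB.contains k := by
  simp [PySem.Dict.contains, List.any_map, Function.comp_def, pvDedupEntry]

-- One loop step preserves the invariant (dA's items are the dedup-image of dB's items).
theorem pv_step (dA dB : PySem.Dict String (List String))
    (hnd : dB.keys.Nodup)
    (h : dA.items = dB.items.map pvDedupEntry) (it v : String) :
    (if dA.contains it && !((dA.getD it []).contains v) then dA.modify it [] (· ++ [v])
     else if !(dA.contains it) then dA.insert it [v] else dA).items
      = (dB.modify it [] (· ++ [v])).items.map pvDedupEntry := by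
  have hdAeq : dA = PySem.Dict.mk (dB.items.map pvDedupEntry) := by
    cases dA; simpa using h
  subst hdAeq
  have hc := pv_contains_map dB it
  have hg := pv_get?_map dB it
  rw [PySem.Dict.modify, PySem.Dict.modify]
  cases hfind : dB.get? it with
  | none =>
      -- key absent on both sides: both inserts append a fresh entry
      have hcB : dB.contains it = false := by
        rw [PySem.Dict.contains_eq_isSome_get?, hfind]; rfl
      have hcA : (PySem.Dict.mk (dB.items.map pvDedupEntry)).contains it = false := by
        rw [hc]; exact hcB
      have hgB : dB.getD it [] = [] := by simp [PySem.Dict.getD, hfind]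
      simp [hcA, hcB, PySem.Dict.insert, hgB, pvDedupEntry, PySem.List.dedup,
        PySem.Set.ofList, PySem.Set.add, PySem.Set.empty, PySem.Set.contains]
  | some vs =>
      -- key present: get? finds the unique entry, both sides rewrite it in place
      have hcB : dB.contains it = true := by
        rw [PySem.Dict.contains_eq_isSome_get?, hfind]; rfl
      have hcA : (PySem.Dict.mk (dB.items.map pvDedupEntry)).contains it = true := by
        rw [hc]; exact hcB
      have hgA : (PySem.Dict.mk (dB.items.map pvDedupEntry)).getD it [] = PySem.List.dedup vs := by
        simp only [PySem.Dict.getD, hg, hfind, Option.map_some, Option.getD_some]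
      have hgB : dB.getD it [] = vs := by simp [PySem.Dict.getD, hfind]
      -- each entry of dB keyed `it` carries exactly the value vs (keys are Nodup)
      have huniq : ∀ p ∈ dB.items, p.1 = it → p.2 = vs := by
        intro p hp hpk
        have hpv : dB.get? p.1 = some p.2 :=
          PySem.Dict.get?_of_mem_items dB (by simpa using hp) hnd
        rw [hpk, hfind] at hpv
        exact (Option.some.inj hpv).symm
      rw [hgA, hgB]
      by_cases hvm : v ∈ vs
      · -- vendor already present: A leaves the dict, B's rewrite dedups to the same list
        have hd : PySem.Set.ofList (vs ++ [v]) = PySem.Set.ofList vs := by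
          rw [pv_dedup_append]; simp [hvm]
        rw [if_neg (by simp [hcA, hvm]), if_neg (by simp [hcA])]
        rw [PySem.Dict.insert, if_pos hcB]
        simp only [List.map_map]
        apply List.map_congr_left
        intro p hp
        by_cases hpk : p.1 = it
        · have hpv := huniq p hp hpk
          simp [hpk, hpv, pvDedupEntry, hd]
        · simp [hpk, pvDedupEntry]
      · -- new vendor: A appends to the dedupped list, B's rewrite dedups vs ++ [v]
        have hd : PySem.Set.ofList (vs ++ [v]) = PySem.Set.ofList vs ++ [v] := by
          rw [pv_dedup_append]; simp [hvm]
        rw [if_pos (by simp [hcA, hvm])]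
        rw [PySem.Dict.insert, PySem.Dict.insert, if_pos hcA, if_pos hcB]
        simp only [List.map_map]
        apply List.map_congr_left
        intro p hp
        by_cases hpk : p.1 = it
        · have hpv := huniq p hp hpk
          simp [hpk, hpv, pvDedupEntry, hd]
        · simp [hpk, pvDedupEntry]

theorem pv_nodup_step (dB : PySem.Dict String (List String)) (it v : String)
    (h : dB.keys.Nodup) : (dB.modify it [] (· ++ [v])).keys.Nodup := by
  rw [PySem.Dict.modify]
  exact PySem.Dict.nodup_keys_insert _ _ _ h

-- The whole loops, generalized over related starting dicts.
theorem pv_fold (items vendors : List String) (l : List Int)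
    (dA dB : PySem.Dict String (List String))
    (hnd : dB.keys.Nodup) (h : dA.items = dB.items.map pvDedupEntry) :
    (l.foldl (fun d i =>
        let it := PySem.List.pyGetD items i ""
        let v := PySem.List.pyGetD vendors i ""
        if d.contains it && !((d.getD it []).contains v) then d.modify it [] (· ++ [v])
        else if !(d.contains it) then d.insert it [v] else d) dA).items
      = (l.foldl (fun d i => d.modify (PySem.List.pyGetD items i "") [] (· ++ [PySem.List.pyGetD vendors i ""])) dB).items.map pvDedupEntry := by
  induction l generalizing dA dB with
  | nil => simpa using h
  | cons i rest ih =>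
      simp only [List.foldl_cons]
      apply ih
      · exact pv_nodup_step _ _ _ hnd
      · have := pv_step dA dB hnd h (PySem.List.pyGetD items i "") (PySem.List.pyGetD vendors i "")
        -- the A-side step has a dict value, take items of both sides
        have h2 : (if dA.contains (PySem.List.pyGetD items i "") && !((dA.getD (PySem.List.pyGetD items i "") []).contains (PySem.List.pyGetD vendors i "")) then dA.modify (PySem.List.pyGetD items i "") [] (· ++ [PySem.List.pyGetD vendors i ""])
            else if !(dA.contains (PySem.List.pyGetD items i "")) then dA.insert (PySem.List.pyGetD items i "") [PySem.List.pyGetD vendors i ""] else dA).items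
              = (dB.modify (PySem.List.pyGetD items i "") [] (· ++ [PySem.List.pyGetD vendors i ""])).items.map pvDedupEntry := this
        exact h2

-- ===== VERDICT (by name: the statement is the Claim_ definition above) =====
theorem get_vendors_per_item_spec : Claim_equal_get_vendors_per_item := by
  intro items vendors _ _
  unfold Spec_get_vendors_per_item get_vendors_per_item get_vendors_per_item_alt
  exact pv_fold items vendors _ PySem.Dict.empty PySem.Dict.empty (by simp) (by rfl)
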